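-- pv_equiv track=rewrite | github.com/kiirogami/advent_of_code | aoc_2024/src/day_07.py | check_calibrations
-- ===== SOURCE A (Python) =====
-- import itertools
--
-- def check_calibrations(a, b, part_2=False):
--     if part_2:
--         perms = list(itertools.product([-1, 0, 1], repeat=len(b) - 1))
--     else:
--         perms = list(itertools.product([0, 1], repeat=len(b) - 1))
--     for p in perms:
--         value = b[0]
--         for i in range(1, len(b)):
--             if p[i - 1] == 0:
--                 value += b[i]
--             elif p[i - 1] == 1:
--                 value *= b[i]
--             elif p[i - 1] == -1:
--                 digs = len(str(b[i]))
--                 value = value * 10**digs + b[i]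
--             if value > a:
--                 break
--         else:
--             if value == a:
--                 return True
--     else:
--         return False
-- ===== SOURCE B (Python) =====
-- def check_calibrations(a, b, part_2=False):
--     # DFS over the value sequence, sharing common prefixes and pruning a branch
--     # as soon as its running value exceeds a (the same cut A's inner break makes).
--     ops = (-1, 0, 1) if part_2 else (0, 1)
--
--     def dfs(v, i):
--         if i == len(b):
--             return v == a
--         x = b[i]
--         for op in ops:
--             if op == 0:
--                 v2 = v + x
--             elif op == 1:
--                 v2 = v * x
--             else:
--                 v2 = v * 10 ** len(str(x)) + x
--             if v2 <= a and dfs(v2, i + 1):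
--                 return True
--         return False
--
--     return dfs(b[0], 1)
-- ===== Notes on version B (the rewrite author's own statement) =====
-- stated objective: faster
-- what changed: B replaces A's materialisation of all k^(n-1) operator tuples and per-tuple re-evaluation with a recursive DFS over the sequence that shares common prefixes and prunes a branch (with A's own cut: running value > target) as soon as it is created, so pruned subtrees are never enumerated.
import Mathlib
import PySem

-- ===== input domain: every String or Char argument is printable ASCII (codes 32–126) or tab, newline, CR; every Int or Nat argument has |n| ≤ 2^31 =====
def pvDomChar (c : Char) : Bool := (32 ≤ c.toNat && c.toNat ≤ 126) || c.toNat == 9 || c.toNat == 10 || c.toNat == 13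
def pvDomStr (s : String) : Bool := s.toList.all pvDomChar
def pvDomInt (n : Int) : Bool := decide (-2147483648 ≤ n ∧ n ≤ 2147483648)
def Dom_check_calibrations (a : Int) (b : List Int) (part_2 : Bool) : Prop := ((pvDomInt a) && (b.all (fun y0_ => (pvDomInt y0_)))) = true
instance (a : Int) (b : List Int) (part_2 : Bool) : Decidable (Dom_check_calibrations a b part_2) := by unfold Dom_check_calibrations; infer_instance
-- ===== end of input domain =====

-- B replaces A's enumeration of all operator tuples by a pruning DFS over the sequence
-- (same return value on every non-empty b; intended to be faster by pruning).

-- ===== PORT A =====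
-- one step of A's inner loop: apply operator `op` (0 = +, 1 = *, -1 = digit concat)
def pvStepA (v op x : Int) : Int :=
  if op == 0 then v + x
  else if op == 1 then v * x
  else if op == -1 then v * 10 ^ (PySem.Int.toStr x).toList.length + x
  else v

-- itertools.product(l, repeat = n), first coordinate varying slowest
def pvProdRep (l : List Int) : Nat → List (List Int)
  | 0 => [[]]
  | n + 1 => l.flatMap (fun op => (pvProdRep l n).map (op :: ·))

-- A's inner for-loop over i = 1..len(b)-1 with the `break` (= return false) and the
-- for-else check `value == a`; p and b[1:] have equal length, walked together
def pvRunPerm (a : Int) (v : Int) : List Int → List Int → Bool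
  | op :: ops, x :: xs =>
      let v2 := pvStepA v op x
      if v2 > a then false else pvRunPerm a v2 ops xs
  | _, _ => v == a

def check_calibrations (a : Int) (b : List Int) (part_2 : Bool) : Bool :=
  let perms := if part_2 then pvProdRep [-1, 0, 1] (b.length - 1)
               else pvProdRep [0, 1] (b.length - 1)
  match b with
  | [] => false   -- unreachable: Python raises ValueError here (outside Pre_)
  | x :: xs => perms.any (fun p => pvRunPerm a x p xs)

-- ===== PORT B =====
def pvStepB (v op x : Int) : Int :=
  if op == 0 then v + x
  else if op == 1 then v * x
  else v * 10 ^ (PySem.Int.toStr x).toList.length + x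

-- Source B's dfs(v, i), as structural recursion over the suffix b[i:]
def pvDfs (a : Int) (ops : List Int) (v : Int) : List Int → Bool
  | [] => v == a
  | x :: xs => ops.any (fun op =>
      let v2 := pvStepB v op x
      decide (v2 ≤ a) && pvDfs a ops v2 xs)

def check_calibrations_alt (a : Int) (b : List Int) (part_2 : Bool) : Bool :=
  let ops := if part_2 then [-1, 0, 1] else [0, 1]
  match b with
  | [] => false   -- unreachable: Python raises IndexError here (outside Pre_)
  | x :: xs => pvDfs a ops x xs

-- ===== PRECONDITION & SPEC =====
-- Pre_ excludes only b = [], on which Python A raises ValueError (negative product repeat).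
def Pre_check_calibrations (a : Int) (b : List Int) (part_2 : Bool) : Prop := b ≠ []
instance (a : Int) (b : List Int) (part_2 : Bool) : Decidable (Pre_check_calibrations a b part_2) := by unfold Pre_check_calibrations; infer_instance
def pvWitness_check_calibrations : Int × List Int × Bool := (6, [2, 3], false)

def Spec_check_calibrations (a : Int) (b : List Int) (part_2 : Bool) (out : Bool) : Prop := out = check_calibrations_alt a b part_2
instance (a : Int) (b : List Int) (part_2 : Bool) (out : Bool) : Decidable (Spec_check_calibrations a b part_2 out) := by unfold Spec_check_calibrations; infer_instance

-- ===== CLAIM (what is proved, stated in full; the proofs are below) =====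
def Claim_equal_check_calibrations : Prop := ∀ (a : Int) (b : List Int) (part_2 : Bool), Dom_check_calibrations a b part_2 → Pre_check_calibrations a b part_2 → Spec_check_calibrations a b part_2 (check_calibrations a b part_2)

-- ===== LEMMAS AND PROOFS =====

theorem pvStep_eq (v op x : Int) (h : op = 0 ∨ op = 1 ∨ op = -1) :
    pvStepA v op x = pvStepB v op x := by
  rcases h with h | h | h <;> subst h <;> simp [pvStepA, pvStepB]

theorem pvAnyCongr {α : Type} (l : List α) (f g : α → Bool)
    (h : ∀ x ∈ l, f x = g x) : l.any f = l.any g := by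
  induction l with
  | nil => rfl
  | cons y ys ih =>
    simp only [List.any_cons, h y List.mem_cons_self,
      ih (fun x hx => h x (List.mem_cons_of_mem y hx))]

theorem pvKey (a : Int) (l : List Int) (hl : ∀ op ∈ l, op = 0 ∨ op = 1 ∨ op = -1) :
    ∀ (xs : List Int) (v : Int),
      (pvProdRep l xs.length).any (fun p => pvRunPerm a v p xs) = pvDfs a l v xs := by
  intro xs
  induction xs with
  | nil => intro v; simp [pvProdRep, pvRunPerm, pvDfs]
  | cons x xs ih =>
    intro v
    show (l.flatMap (fun op => (pvProdRep l xs.length).map (op :: ·))).any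
        (fun p => pvRunPerm a v p (x :: xs)) = pvDfs a l v (x :: xs)
    rw [List.any_flatMap]
    show l.any (fun op => ((pvProdRep l xs.length).map (op :: ·)).any
        (fun p => pvRunPerm a v p (x :: xs))) = pvDfs a l v (x :: xs)
    simp only [List.any_map]
    rw [pvDfs]
    apply pvAnyCongr
    intro op hop
    have hs : pvStepA v op x = pvStepB v op x := pvStep_eq v op x (hl op hop)
    show ((pvProdRep l xs.length).any fun p => pvRunPerm a v (op :: p) (x :: xs))
        = (decide (pvStepB v op x ≤ a) && pvDfs a l (pvStepB v op x) xs)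
    simp only [pvRunPerm, ← hs]
    by_cases hgt : pvStepA v op x > a
    · simp [hgt, not_le.mpr hgt]
    · have hle : pvStepA v op x ≤ a := not_lt.mp hgt
      simp only [if_neg hgt, hle, decide_true, Bool.true_and]
      exact ih (pvStepA v op x)

-- ===== VERDICT (by name: the statement is the Claim_ definition above) =====
theorem check_calibrations_spec : Claim_equal_check_calibrations := by
  intro a b part_2 _ hpre
  unfold Spec_check_calibrations
  match b with
  | [] => exact absurd rfl hpre
  | x :: xs =>
    cases part_2 <;>
      simpa [check_calibrations, check_calibrations_alt] using
        pvKey a _ (by intro op hop; fin_cases hop <;> simp) xs x
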